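-- pv_equiv track=rewrite | github.com/jknific123/Algorithmic-Trading | dow_index_time_lines/simulation_util.py | preveriSpremembeHoldingov
-- ===== SOURCE A (Python) =====
-- def preveriSpremembeHoldingov(holdings, ustrezna_podjetja):
--     listUstreznih = []
--     for ustrezni in ustrezna_podjetja:
--         listUstreznih.append(ustrezni[1])
--
--     # damo oboje v list in ju sortiramo nato pa primerjamo
--     trenutni_holdings = list(holdings.keys())
--     trenutni_holdings.sort()
--     listUstreznih.sort()
--
--     if trenutni_holdings == listUstreznih:
--         return False
--
--     return True
-- ===== SOURCE B (Python) =====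
-- def preveriSpremembeHoldingov(holdings, ustrezna_podjetja):
--     # multiset comparison by frequency maps: no sorting
--     c1 = {}
--     for k in holdings.keys():
--         c1[k] = c1.get(k, 0) + 1
--     c2 = {}
--     for u in ustrezna_podjetja:
--         c2[u[1]] = c2.get(u[1], 0) + 1
--     return c1 != c2
-- ===== Notes on version B (the rewrite author's own statement) =====
-- stated objective: alternative
-- what changed: replaces A's sort-both-lists-and-compare with building two frequency dictionaries in one pass each and testing them for map equality (multiset equality), eliminating sorting entirely
import Mathlib
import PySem

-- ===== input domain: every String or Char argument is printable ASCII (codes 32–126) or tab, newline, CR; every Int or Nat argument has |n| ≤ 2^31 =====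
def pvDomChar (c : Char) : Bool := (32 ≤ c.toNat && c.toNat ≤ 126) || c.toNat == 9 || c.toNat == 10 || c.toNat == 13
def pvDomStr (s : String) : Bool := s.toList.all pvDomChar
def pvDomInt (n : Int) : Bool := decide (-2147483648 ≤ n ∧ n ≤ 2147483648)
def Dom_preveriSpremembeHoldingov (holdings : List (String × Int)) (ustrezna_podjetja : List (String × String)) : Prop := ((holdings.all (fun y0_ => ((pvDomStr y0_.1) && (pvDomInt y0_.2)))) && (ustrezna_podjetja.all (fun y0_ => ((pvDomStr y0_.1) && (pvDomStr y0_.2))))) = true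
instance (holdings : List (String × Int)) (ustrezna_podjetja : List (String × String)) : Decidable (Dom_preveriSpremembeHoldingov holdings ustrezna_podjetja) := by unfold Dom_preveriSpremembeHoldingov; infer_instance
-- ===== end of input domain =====

-- B replaces A's sort-both-lists-and-compare with two frequency dictionaries compared as maps (alternative algorithm, no sorting).


-- ===== PORT A =====
def preveriSpremembeHoldingov (holdings : List (String × Int)) (ustrezna_podjetja : List (String × String)) : Bool :=
  let listUstreznih := ustrezna_podjetja.foldl (fun acc ustrezni => acc ++ [ustrezni.2]) []
  let trenutni_holdings := holdings.map (·.1)           -- list(holdings.keys())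
  let trenutni_holdings : List String := PySem.List.sorted trenutni_holdings (fun x => x) false
  let listUstreznih : List String := PySem.List.sorted listUstreznih (fun x => x) false
  if trenutni_holdings = listUstreznih then false else true

-- ===== PORT B =====
-- Python's dict == ignores insertion order: compare by mutual get? agreement on both key lists.
def pvDictPyEq (d1 d2 : PySem.Dict String Int) : Bool :=
  d1.keys.all (fun k => d2.get? k == d1.get? k) && d2.keys.all (fun k => d1.get? k == d2.get? k)

def preveriSpremembeHoldingov_alt (holdings : List (String × Int)) (ustrezna_podjetja : List (String × String)) : Bool :=
  !(pvDictPyEq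
      ((holdings.map (·.1)).foldl (fun d k => d.insert k (d.getD k 0 + 1)) PySem.Dict.empty)
      (ustrezna_podjetja.foldl (fun d u => d.insert u.2 (d.getD u.2 0 + 1)) PySem.Dict.empty))

-- ===== PRECONDITION & SPEC =====
def Spec_preveriSpremembeHoldingov (holdings : List (String × Int)) (ustrezna_podjetja : List (String × String)) (out : Bool) : Prop := out = preveriSpremembeHoldingov_alt holdings ustrezna_podjetja
instance (holdings : List (String × Int)) (ustrezna_podjetja : List (String × String)) (out : Bool) : Decidable (Spec_preveriSpremembeHoldingov holdings ustrezna_podjetja out) := by unfold Spec_preveriSpremembeHoldingov; infer_instance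

-- ===== CLAIM (what is proved, stated in full; the proofs are below) =====
def Claim_equal_preveriSpremembeHoldingov : Prop := ∀ (holdings : List (String × Int)) (ustrezna_podjetja : List (String × String)), Dom_preveriSpremembeHoldingov holdings ustrezna_podjetja → Spec_preveriSpremembeHoldingov holdings ustrezna_podjetja (preveriSpremembeHoldingov holdings ustrezna_podjetja)

-- ===== LEMMAS AND PROOFS =====

-- get? on a counter, characterised by the count
lemma pv_get?_counter (l : List String) (v : String) :
    (PySem.Dict.counter l).get? v = if 0 < l.count v then some (l.count v : Int) else none := by
  by_cases h : v ∈ l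
  · have hc : 0 < l.count v := List.count_pos_iff.mpr h
    have hsome : (PySem.Dict.counter l).get? v ≠ none := by
      simp [PySem.Dict.get?_eq_none_iff_not_mem_keys, PySem.Dict.keys_counter,
        PySem.Set.mem_ofList, h]
    cases hg : (PySem.Dict.counter l).get? v with
    | none => exact absurd hg hsome
    | some w =>
      have := PySem.Dict.getD_of_get?_eq_some _ (0 : Int) hg
      rw [PySem.Dict.getD_counter] at this
      simp [hc, ← this]
  · have hc : l.count v = 0 := List.count_eq_zero.mpr h
    have : (PySem.Dict.counter l).get? v = none := by
      rw [PySem.Dict.get?_eq_none_iff_not_mem_keys, PySem.Dict.keys_counter]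
      simp [PySem.Set.mem_ofList, h]
    simp [this, hc]

-- map equality of two counters is multiset equality
lemma pv_dictPyEq_counter (l1 l2 : List String) :
    pvDictPyEq (PySem.Dict.counter l1) (PySem.Dict.counter l2) = true ↔ l1.Perm l2 := by
  unfold pvDictPyEq
  rw [List.perm_iff_count]
  simp only [Bool.and_eq_true, List.all_eq_true, PySem.Dict.keys_counter,
    PySem.Set.mem_ofList, beq_iff_eq]
  constructor
  · rintro ⟨h1, h2⟩ v
    by_cases hv1 : v ∈ l1
    · have := h1 v hv1
      rw [pv_get?_counter, pv_get?_counter] at this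
      have hc1 : 0 < l1.count v := List.count_pos_iff.mpr hv1
      by_cases hc2 : 0 < l2.count v
      · simp [hc1, hc2] at this; omega
      · simp [hc1, hc2] at this
    · by_cases hv2 : v ∈ l2
      · have := h2 v hv2
        rw [pv_get?_counter, pv_get?_counter] at this
        have hc2 : 0 < l2.count v := List.count_pos_iff.mpr hv2
        by_cases hc1 : 0 < l1.count v
        · simp [hc1, hc2] at this; omega
        · simp [hc1, hc2] at this
      · rw [List.count_eq_zero.mpr hv1, List.count_eq_zero.mpr hv2]
  · intro h
    constructor <;> intro v _ <;> rw [pv_get?_counter, pv_get?_counter, h v]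

-- the loops of B are counters
lemma pv_alt_eq (holdings : List (String × Int)) (ustrezna_podjetja : List (String × String)) :
    preveriSpremembeHoldingov_alt holdings ustrezna_podjetja
      = !(pvDictPyEq (PySem.Dict.counter (holdings.map (·.1)))
            (PySem.Dict.counter (ustrezna_podjetja.map (·.2)))) := by
  unfold preveriSpremembeHoldingov_alt
  rw [PySem.Dict.foldl_insert_getD_add_one_eq_counter,
    ← PySem.Dict.foldl_insert_getD_add_one_eq_counter (ustrezna_podjetja.map (·.2)),
    List.foldl_map]

-- ===== VERDICT (by name: the statement is the Claim_ definition above) =====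
theorem preveriSpremembeHoldingov_spec : Claim_equal_preveriSpremembeHoldingov := by
  intro holdings ustrezna_podjetja _
  unfold Spec_preveriSpremembeHoldingov
  rw [pv_alt_eq]
  unfold preveriSpremembeHoldingov
  simp only [PySem.List.foldl_append_singleton_eq_map, List.nil_append]
  rw [show List.map Prod.snd ustrezna_podjetja
        = List.map (fun x : String × String => x.2) ustrezna_podjetja from rfl]
  split_ifs with hs
  · rw [(pv_dictPyEq_counter _ _).mpr
      ((PySem.List.sorted_id_eq_sorted_id_iff_perm _ _).mp hs)]
    rfl
  · cases hb : pvDictPyEq (PySem.Dict.counter (holdings.map (·.1)))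
        (PySem.Dict.counter (ustrezna_podjetja.map (·.2))) with
    | false => rfl
    | true =>
      exact absurd ((PySem.List.sorted_id_eq_sorted_id_iff_perm _ _).mpr
        ((pv_dictPyEq_counter _ _).mp hb)) hs
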